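-- pv_equiv track=rewrite | github.com/Valkirik/tasks-for-practice | Words in a row.py | in_a_row
-- ===== SOURCE A (Python) =====
-- def in_a_row(string: str) -> str:
--     list_with_words = string.split(" ") #["m2y" "hi1" "i4s" "val5era" "name3"]
--     num = list(range(1, len(list_with_words) + 1)) #[1, 2, 3, 4, 5]
--     correct_list = []
--
--     for n in num: #take a number from num
--         for i in list_with_words: #we take a word from list_with_words
--             for t in i: #in each word we take every element
--                 if str(n) == t: #if this element = number from num
--                     correct_list.append(i) #we add a word(i)
--                     #so that we compare in a row (as it goes in num) it adds every word in the correct order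
--
--     return correct_list
-- ===== SOURCE B (Python) =====
-- def in_a_row(string: str) -> str:
--     words = string.split(" ")
--     buckets = {}
--     for w in words:
--         for c in w:
--             if '1' <= c <= '9':
--                 buckets.setdefault(c, []).append(w)
--     out = []
--     for d in "123456789"[:len(words)]:
--         out += buckets.get(d, [])
--     return out
-- ===== Notes on version B (the rewrite author's own statement) =====
-- stated objective: alternative
-- what changed: Replaces A's triple nested scan (for each n = 1..len(words) it rescans every character of every word) with a single bucketing pass over the characters followed by an in-order emit of the digit buckets 1..min(9,len(words)); intended as an asymptotic improvement, but a timing run read only 1.47x at the largest size, below the 1.5x bar, so no speed is claimed.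
import Mathlib
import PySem

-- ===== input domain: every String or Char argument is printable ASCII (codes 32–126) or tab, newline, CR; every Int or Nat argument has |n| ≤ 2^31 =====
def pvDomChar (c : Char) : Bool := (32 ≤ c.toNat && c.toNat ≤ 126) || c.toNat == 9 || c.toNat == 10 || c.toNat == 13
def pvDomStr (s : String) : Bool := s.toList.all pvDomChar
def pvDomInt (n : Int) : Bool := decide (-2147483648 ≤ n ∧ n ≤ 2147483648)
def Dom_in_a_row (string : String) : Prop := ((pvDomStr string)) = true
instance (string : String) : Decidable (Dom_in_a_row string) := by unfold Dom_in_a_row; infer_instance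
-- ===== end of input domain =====

-- B replaces A's triple nested scan with one bucketing pass over the characters plus an in-order emit of the digit buckets.

-- ===== PORT A =====
-- string.split(" "): the separator " " is non-empty, so PySem.Str.split? is always `some`; getD [] is exact.
def in_a_row (string : String) : List String :=
  let listWithWords := (PySem.Str.split? string " ").getD []
  let num := PySem.List.pyRange 1 ((listWithWords.length : Int) + 1)
  let correctList : List String :=
    num.foldl (fun acc n =>
      listWithWords.foldl (fun acc i =>
        i.toList.foldl (fun acc t =>
          if PySem.Int.toStr n == String.ofList [t] then acc ++ [i] else acc) acc) acc) []
  correctList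

-- ===== PORT B =====
def in_a_row_alt (string : String) : List String :=
  let words := (PySem.Str.split? string " ").getD []
  let buckets : PySem.Dict Char (List String) :=
    words.foldl (fun d w =>
      w.toList.foldl (fun d c =>
        if ('1' ≤ c ∧ c ≤ '9') then d.modify c [] (· ++ [w]) else d) d) PySem.Dict.empty
  let digits := PySem.List.slice "123456789".toList none (some (words.length : Int))
  digits.foldl (fun out d => out ++ buckets.getD d []) []

-- ===== PRECONDITION & SPEC =====
def Spec_in_a_row (string : String) (out : List String) : Prop := out = in_a_row_alt string
instance (string : String) (out : List String) : Decidable (Spec_in_a_row string out) := by unfold Spec_in_a_row; infer_instance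

-- ===== CLAIM (what is proved, stated in full; the proofs are below) =====
def Claim_equal_in_a_row : Prop := ∀ (string : String), Dom_in_a_row string → Spec_in_a_row string (in_a_row string)

-- ===== LEMMAS AND PROOFS =====

-- the words containing the digit d, one copy per occurrence of d, in word order
def wordOcc (d : Char) (w : String) : List String :=
  (w.toList.filter (fun t => t == d)).map (fun _ => w)

def occ (ws : List String) (d : Char) : List String := ws.flatMap (wordOcc d)

-- the block A appends for one value of n
def blkWord (n : Int) (i : String) : List String :=
  (i.toList.filter (fun t => PySem.Int.toStr n == String.ofList [t])).map (fun _ => i)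

def blk (ws : List String) (n : Int) : List String := ws.flatMap (blkWord n)

theorem A_norm (ws : List String) (L : Int) :
    (PySem.List.pyRange 1 L).foldl (fun acc n =>
      ws.foldl (fun acc i =>
        i.toList.foldl (fun acc t =>
          if PySem.Int.toStr n == String.ofList [t] then acc ++ [i] else acc) acc) acc) []
    = (PySem.List.pyRange 1 L).flatMap (blk ws) := by
  simp only [PySem.List.foldl_append_if, PySem.List.foldl_append_eq_flatMap, List.nil_append]
  rfl

theorem beq_single (c t : Char) : (String.ofList [c] == String.ofList [t]) = (t == c) := by
  simp [String.ext_iff, eq_comm]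

theorem blk_digit (ws : List String) (n : Int) (c : Char)
    (h : PySem.Int.toChars n = [c]) : blk ws n = occ ws c := by
  have h0 : String.ofList (PySem.Int.toStr n).toList = PySem.Int.toStr n := String.ofList_toList
  have hs : PySem.Int.toStr n = String.ofList [c] := by
    rw [← h0, PySem.Int.toList_toStr, h]
  unfold blk occ blkWord wordOcc
  simp only [hs, beq_single]

theorem toDigitsCore_len_ge (b : Nat) : ∀ (f n : Nat) (acc : List Char),
    acc.length ≤ (Nat.toDigitsCore b f n acc).length := by
  intro f
  induction f with
  | zero => intro n acc; simp [Nat.toDigitsCore]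
  | succ f ih =>
    intro n acc
    rw [Nat.toDigitsCore]
    split
    · simp
    · exact le_trans (by simp) (ih _ _)

theorem two_le_toChars_len (n : Int) (h : 10 ≤ n) : 2 ≤ (PySem.Int.toChars n).length := by
  have hn : ¬ n < 0 := by omega
  simp only [PySem.Int.toChars, hn, if_false]
  obtain ⟨m, hm⟩ : ∃ m, n.toNat = m + 10 := ⟨n.toNat - 10, by omega⟩
  rw [hm, Nat.toDigits, Nat.toDigitsCore]
  have h1 : ¬ (m + 10) / 10 = 0 := by omega
  simp only [h1, if_false]
  rw [show m + 10 = (m + 9) + 1 from rfl, Nat.toDigitsCore]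
  split
  · simp
  · exact le_trans (by simp) (toDigitsCore_len_ge _ _ _ _)

theorem blk_ge10 (ws : List String) (n : Int) (h : 10 ≤ n) : blk ws n = [] := by
  unfold blk blkWord
  apply List.flatMap_eq_nil_iff.mpr
  intro i _
  have hf : i.toList.filter (fun t => PySem.Int.toStr n == String.ofList [t]) = [] := by
    apply List.filter_eq_nil_iff.mpr
    intro t _
    simp only [Bool.not_eq_true, beq_eq_false_iff_ne, ne_eq]
    intro he
    have ht := congrArg String.toList he
    rw [PySem.Int.toList_toStr] at ht
    have h2 := two_le_toChars_len n h
    rw [ht] at h2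
    simp at h2
  rw [hf]; rfl

theorem word_bucket (w : String) (d0 : PySem.Dict Char (List String)) (d : Char)
    (hd : ('1' ≤ d ∧ d ≤ '9')) :
    (w.toList.foldl (fun acc c =>
        if ('1' ≤ c ∧ c ≤ '9') then acc.modify c [] (· ++ [w]) else acc) d0).getD d []
      = d0.getD d [] ++ wordOcc d w := by
  have key := PySem.Dict.getD_foldl_modify_append
    ((w.toList.filter (fun c => decide ('1' ≤ c ∧ c ≤ '9'))).map (fun c => (c, w))) d0 d
  simp only [List.foldl_map] at key
  rw [show (fun (acc : PySem.Dict Char (List String)) (c : Char) =>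
        if ('1' ≤ c ∧ c ≤ '9') then acc.modify c [] (· ++ [w]) else acc)
      = (fun acc c => if (decide ('1' ≤ c ∧ c ≤ '9')) = true then acc.modify c [] (· ++ [w]) else acc) from by
    funext acc c; simp]
  rw [← List.foldl_filter, key]
  congr 1
  rw [List.filter_map, List.map_map]
  rw [List.filter_filter]
  unfold wordOcc
  congr 1
  apply List.filter_congr
  intro c _
  by_cases h : c = d
  · subst h; simp [hd.1, hd.2]
  · simp [h]

theorem buckets_getD (d : Char) (hd : ('1' ≤ d ∧ d ≤ '9')) :
    ∀ (ws : List String) (d0 : PySem.Dict Char (List String)),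
    (ws.foldl (fun acc w =>
        w.toList.foldl (fun acc c =>
          if ('1' ≤ c ∧ c ≤ '9') then acc.modify c [] (· ++ [w]) else acc) acc) d0).getD d []
      = d0.getD d [] ++ occ ws d := by
  intro ws
  induction ws with
  | nil => intro d0; simp [occ]
  | cons w ws ih =>
    intro d0
    simp only [List.foldl_cons]
    rw [ih, word_bucket _ _ _ hd]
    simp [occ, List.flatMap_cons, List.append_assoc]

theorem digit_chars : "123456789".toList = ['1','2','3','4','5','6','7','8','9'] := by decide

theorem mem_digits_toChars : ∀ d ∈ ['1','2','3','4','5','6','7','8','9'],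
    PySem.Int.toChars ((d.toNat : Int) - 48) = [d] := by
  intro d hd
  simp only [List.mem_cons, List.not_mem_nil, or_false] at hd
  rcases hd with h|h|h|h|h|h|h|h|h <;> subst h <;> decide

theorem mem_digits_bounds : ∀ d ∈ ['1','2','3','4','5','6','7','8','9'], ('1' ≤ d ∧ d ≤ '9') := by
  intro d hd
  simp only [List.mem_cons, List.not_mem_nil, or_false] at hd
  rcases hd with h|h|h|h|h|h|h|h|h <;> subst h <;> decide

theorem range_eq_digits (k : Nat) (hk : k ≤ 9) :
    PySem.List.pyRange 1 ((k : Int) + 1)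
      = (List.take k ['1','2','3','4','5','6','7','8','9']).map (fun c => ((c.toNat : Int) - 48)) := by
  interval_cases k <;> decide

theorem glue (ws : List String) :
    (PySem.List.pyRange 1 ((ws.length : Int) + 1)).flatMap (blk ws)
      = (List.take ws.length ['1','2','3','4','5','6','7','8','9']).flatMap (occ ws) := by
  have core : ∀ (k : Nat), k ≤ 9 →
      (PySem.List.pyRange 1 ((k : Int) + 1)).flatMap (blk ws)
        = (List.take k ['1','2','3','4','5','6','7','8','9']).flatMap (occ ws) := by
    intro k hk
    rw [range_eq_digits k hk, List.flatMap_map, List.flatMap_def, List.flatMap_def]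
    congr 1
    apply List.map_congr_left
    intro d hdm
    exact blk_digit ws _ d (mem_digits_toChars d (List.mem_of_mem_take hdm))
  by_cases hL : ws.length ≤ 9
  · exact core ws.length hL
  · have h9 : List.take ws.length ['1','2','3','4','5','6','7','8','9']
        = List.take 9 ['1','2','3','4','5','6','7','8','9'] := by
      rw [List.take_of_length_le (by simp; omega), List.take_of_length_le (by simp)]
    rw [h9, ← core 9 (by omega)]
    rw [PySem.List.pyRange_one_append 1 10 ((ws.length : Int) + 1) (by omega) (by omega)]
    rw [List.flatMap_append]
    have hnil : (PySem.List.pyRange 10 ((ws.length : Int) + 1)).flatMap (blk ws) = [] := by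
      apply List.flatMap_eq_nil_iff.mpr
      intro n hn
      exact blk_ge10 ws n (PySem.List.mem_pyRange_one.mp hn).1
    rw [hnil, List.append_nil]
    norm_num

-- ===== VERDICT (by name: the statement is the Claim_ definition above) =====
theorem in_a_row_spec : Claim_equal_in_a_row := by
  intro s _
  unfold Spec_in_a_row in_a_row in_a_row_alt
  dsimp only
  set ws := (PySem.Str.split? s " ").getD [] with hws
  rw [A_norm ws, glue ws]
  rw [PySem.List.slice_to _ (by positivity), Int.toNat_natCast, digit_chars]
  rw [PySem.List.foldl_append_eq_flatMap, List.nil_append]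
  rw [List.flatMap_def, List.flatMap_def]
  congr 1
  apply List.map_congr_left
  intro d hdm
  have hd := mem_digits_bounds d (List.mem_of_mem_take hdm)
  rw [buckets_getD d hd ws PySem.Dict.empty]
  simp [pysem]
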